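-- pv_equiv track=rewrite | github.com/calebini/kinflow | scripts/daemon_run.py | _mapping_fields_valid
-- ===== SOURCE A (Python) =====
-- from typing import Any
--
-- MAPPING_REQUIRED_FIELDS = (
--     "normalized_outcome_class",
--     "provider_confirmation_strength",
--     "provider_status_code",
--     "provider_receipt_ref",
--     "raw_reason_code",
-- )
--
-- ALLOWED_NORMALIZED_OUTCOMES = {"success", "transient", "permanent", "blocked", "suppressed", "unknown"}
--
-- ALLOWED_CONFIRMATION_STRENGTHS = {"confirmed", "accepted", "none"}
--
-- def _mapping_fields_valid(mapping_fields: dict[str, Any]) -> bool: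
--     if not mapping_fields:
--         return False
--     if mapping_fields.get("normalized_outcome_class") not in ALLOWED_NORMALIZED_OUTCOMES:
--         return False
--     if mapping_fields.get("provider_confirmation_strength") not in ALLOWED_CONFIRMATION_STRENGTHS:
--         return False
--     if not isinstance(mapping_fields.get("provider_status_code"), (str, type(None))):
--         return False
--     if not isinstance(mapping_fields.get("provider_receipt_ref"), (str, type(None))):
--         return False
--     if not isinstance(mapping_fields.get("raw_reason_code"), (str, type(None))):
--         return False
--     for field in MAPPING_REQUIRED_FIELDS:
--         if field not in mapping_fields:
--             return False
--     return True
-- ===== SOURCE B (Python) =====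
-- from typing import Any
--
-- MAPPING_REQUIRED_FIELDS = (
--     "normalized_outcome_class",
--     "provider_confirmation_strength",
--     "provider_status_code",
--     "provider_receipt_ref",
--     "raw_reason_code",
-- )
--
-- ALLOWED_NORMALIZED_OUTCOMES = {"success", "transient", "permanent", "blocked", "suppressed", "unknown"}
--
-- ALLOWED_CONFIRMATION_STRENGTHS = {"confirmed", "accepted", "none"}
--
-- def _mapping_fields_valid(mapping_fields: dict[str, Any]) -> bool:
--     # Single pass over the dict's items (instead of per-field probes with .get):
--     # validate each entry as it streams by, tracking which required fields are
--     # still missing; valid iff no entry fails and nothing is left missing.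
--     # (The empty-dict guard is subsumed: an empty dict leaves everything missing.)
--     missing = set(MAPPING_REQUIRED_FIELDS)
--     for key, value in mapping_fields.items():
--         if key == "normalized_outcome_class":
--             if value not in ALLOWED_NORMALIZED_OUTCOMES:
--                 return False
--         elif key == "provider_confirmation_strength":
--             if value not in ALLOWED_CONFIRMATION_STRENGTHS:
--                 return False
--         elif key in ("provider_status_code", "provider_receipt_ref", "raw_reason_code"):
--             if not isinstance(value, (str, type(None))):
--                 return False
--         missing.discard(key)
--     return not missing
-- ===== Notes on version B (the rewrite author's own statement) =====
-- stated objective: alternative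
-- what changed: Instead of A's fixed sequence of per-field dict probes (.get for each of five fields, then a presence loop over the required tuple), B makes one streaming pass over the dict's own items, validating each entry as it arrives and tracking a set of still-missing required fields; valid iff no entry fails and the missing set is empty (which also subsumes A's empty-dict guard).
import Mathlib
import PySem

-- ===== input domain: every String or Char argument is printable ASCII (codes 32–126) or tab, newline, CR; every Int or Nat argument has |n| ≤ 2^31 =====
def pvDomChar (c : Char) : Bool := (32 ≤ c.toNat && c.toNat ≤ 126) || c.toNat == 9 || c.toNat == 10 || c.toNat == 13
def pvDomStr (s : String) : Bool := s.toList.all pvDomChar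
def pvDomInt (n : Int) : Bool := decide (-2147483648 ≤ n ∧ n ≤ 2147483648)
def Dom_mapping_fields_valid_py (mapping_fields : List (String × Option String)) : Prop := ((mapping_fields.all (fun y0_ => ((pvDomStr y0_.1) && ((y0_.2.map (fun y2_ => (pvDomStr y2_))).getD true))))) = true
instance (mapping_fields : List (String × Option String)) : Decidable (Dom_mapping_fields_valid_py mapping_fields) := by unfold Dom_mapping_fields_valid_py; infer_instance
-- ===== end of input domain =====

-- B replaces A's fixed sequence of per-field dict probes by one streaming pass over the
-- dict's own items with a missing-required-fields accumulator (alternative; same cost).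

-- ===== PORT A =====
-- dict[str, Optional[str]] is an association list; Python dict lookup = first match.
-- mapping_fields.get(k) : Optional[str] — none both when the key is absent and when
-- it maps to None (Option.join of the first-match lookup is exact for this).
def pvGetA (mapping_fields : List (String × Option String)) (k : String) : Option String :=
  (mapping_fields.lookup k).join

-- `v in ALLOWED_NORMALIZED_OUTCOMES`: None is not in a set of strings.
def pvInOutcomes (v : Option String) : Bool :=
  match v with
  | some s => ["success", "transient", "permanent", "blocked", "suppressed", "unknown"].contains s
  | none => false

def pvInStrengths (v : Option String) : Bool :=
  match v with
  | some s => ["confirmed", "accepted", "none"].contains s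
  | none => false

-- isinstance(v, (str, type(None))): always true for a value of type Optional[str]
-- (exact under the task's type convention).
def pvIsStrOrNone (_ : Option String) : Bool := true

-- `for field in MAPPING_REQUIRED_FIELDS: if field not in mapping_fields: return False`
def pvRequiredPresent (fields : List String) (mapping_fields : List (String × Option String)) : Bool :=
  match fields with
  | [] => true
  | f :: rest =>
      if (mapping_fields.map Prod.fst).contains f then pvRequiredPresent rest mapping_fields
      else false

def mapping_fields_valid_py (mapping_fields : List (String × Option String)) : Bool :=
  if mapping_fields.isEmpty then false
  else if !(pvInOutcomes (pvGetA mapping_fields "normalized_outcome_class")) then false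
  else if !(pvInStrengths (pvGetA mapping_fields "provider_confirmation_strength")) then false
  else if !(pvIsStrOrNone (pvGetA mapping_fields "provider_status_code")) then false
  else if !(pvIsStrOrNone (pvGetA mapping_fields "provider_receipt_ref")) then false
  else if !(pvIsStrOrNone (pvGetA mapping_fields "raw_reason_code")) then false
  else pvRequiredPresent ["normalized_outcome_class", "provider_confirmation_strength",
                          "provider_status_code", "provider_receipt_ref", "raw_reason_code"]
                         mapping_fields

-- ===== PORT B =====
-- the missing-set starts as the required tuple (PySem.Set over strings)
def pvRequiredList : List String :=
  ["normalized_outcome_class", "provider_confirmation_strength",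
   "provider_status_code", "provider_receipt_ref", "raw_reason_code"]

-- Source B's loop body: validate one (key, value) entry (the isinstance branch is
-- always true for an Optional[str] value, exact under the type convention).
def pvEntryOk (k : String) (v : Option String) : Bool :=
  if k = "normalized_outcome_class" then
    v.elim false (["success", "transient", "permanent", "blocked", "suppressed", "unknown"].contains ·)
  else if k = "provider_confirmation_strength" then
    v.elim false (["confirmed", "accepted", "none"].contains ·)
  else if ["provider_status_code", "provider_receipt_ref", "raw_reason_code"].contains k then
    true
  else
    true

-- Source B's loop: stream over the items, `return False` on a failing entry,
-- `missing.discard(key)` otherwise; at the end `return not missing`.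
def pvScan (items : List (String × Option String)) (missing : List String) : Bool :=
  match items with
  | [] => missing.isEmpty
  | (k, v) :: rest =>
      if pvEntryOk k v then pvScan rest (missing.erase k) else false

def mapping_fields_valid_py_alt (mapping_fields : List (String × Option String)) : Bool :=
  pvScan mapping_fields pvRequiredList

-- ===== PRECONDITION & SPEC =====
-- Pre_ excludes association lists with duplicate keys: they represent no Python dict
-- (a dict's keys are distinct by construction), so nothing A accepts is excluded.
def Pre_mapping_fields_valid_py (mapping_fields : List (String × Option String)) : Prop :=
  (mapping_fields.map Prod.fst).Nodup
instance (mapping_fields : List (String × Option String)) : Decidable (Pre_mapping_fields_valid_py mapping_fields) := by unfold Pre_mapping_fields_valid_py; infer_instance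

def pvWitness_mapping_fields_valid_py : (List (String × Option String)) :=
  [("normalized_outcome_class", some "success"),
   ("provider_confirmation_strength", some "confirmed"),
   ("provider_status_code", some "200"),
   ("provider_receipt_ref", none),
   ("raw_reason_code", some "ok")]

def Spec_mapping_fields_valid_py (mapping_fields : List (String × Option String)) (out : Bool) : Prop := out = mapping_fields_valid_py_alt mapping_fields
instance (mapping_fields : List (String × Option String)) (out : Bool) : Decidable (Spec_mapping_fields_valid_py mapping_fields out) := by unfold Spec_mapping_fields_valid_py; infer_instance

-- ===== CLAIM (what is proved, stated in full; the proofs are below) =====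
def Claim_equal_mapping_fields_valid_py : Prop := ∀ (mapping_fields : List (String × Option String)), Dom_mapping_fields_valid_py mapping_fields → Pre_mapping_fields_valid_py mapping_fields → Spec_mapping_fields_valid_py mapping_fields (mapping_fields_valid_py mapping_fields)

-- ===== LEMMAS AND PROOFS =====
theorem pv_contains_eq_lookup_isSome (m : List (String × Option String)) (f : String) :
    (m.map Prod.fst).contains f = (m.lookup f).isSome := by
  induction m with
  | nil => rfl
  | cons p rest ih =>
      simp only [List.map_cons, List.contains_cons, List.lookup]
      by_cases hb : f = p.1
      · simp [hb]
      · have hbe : (f == p.1) = false := by simp [hb]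
        simp only [List.contains_eq_mem] at ih
        simp [hbe, ih]

-- pvScan = (all entries ok) && (every still-missing field occurs among the keys)
theorem pvScan_characterization (items : List (String × Option String)) :
    ∀ (missing : List String), missing.Nodup →
    pvScan items missing =
      (items.all (fun p => pvEntryOk p.1 p.2) &&
       missing.all (fun f => (items.map Prod.fst).contains f)) := by
  induction items with
  | nil =>
      intro missing _
      cases missing <;> simp [pvScan]
  | cons p rest ih =>
      intro missing hnd
      obtain ⟨k, v⟩ := p
      simp only [pvScan]
      by_cases hok : pvEntryOk k v
      · rw [ih (missing.erase k) (hnd.erase k)]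
        simp only [List.all_cons, hok, if_true, Bool.true_and, List.map_cons]
        congr 1
        rw [Bool.eq_iff_iff]
        simp only [List.all_eq_true]
        constructor <;> intro h f hf
        · by_cases hfk : f = k
          · simp [hfk]
          · have : f ∈ missing.erase k := (List.mem_erase_of_ne hfk).mpr hf
            have := h f this
            simpa [hfk] using this
        · obtain ⟨hfk, hfm⟩ := hnd.mem_erase_iff.mp hf
          have := h f hfm
          simpa [hfk] using this
      · simp [hok]

-- keys not among the keys have no first match
theorem pv_lookup_none (a : String) (l : List (String × Option String))
    (h : a ∉ l.map Prod.fst) : l.lookup a = none := by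
  induction l with
  | nil => rfl
  | cons p rest ih =>
      simp only [List.map_cons, List.mem_cons, not_or] at h
      simp only [List.lookup]
      have hb : (a == p.1) = false := by simp [h.1]
      simp [hb, ih h.2]

-- with distinct keys, "all entries ok" is exactly the two first-match value checks
theorem pv_all_entryOk (m : List (String × Option String))
    (hnd : (m.map Prod.fst).Nodup) :
    m.all (fun p => pvEntryOk p.1 p.2) =
      ((m.lookup "normalized_outcome_class").elim true
         (fun v => v.elim false (["success", "transient", "permanent", "blocked", "suppressed", "unknown"].contains ·)) &&
       (m.lookup "provider_confirmation_strength").elim true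
         (fun v => v.elim false (["confirmed", "accepted", "none"].contains ·))) := by
  induction m with
  | nil => rfl
  | cons p rest ih =>
      obtain ⟨k, v⟩ := p
      simp only [List.map_cons, List.nodup_cons] at hnd
      obtain ⟨hk, hrest⟩ := hnd
      have ihv := ih hrest
      simp only [List.all_cons, List.lookup]
      by_cases h1 : k = "normalized_outcome_class"
      · subst h1
        have hnone : rest.lookup "normalized_outcome_class" = none := pv_lookup_none _ _ hk
        rw [ihv, hnone]
        simp [pvEntryOk]
      · by_cases h2 : k = "provider_confirmation_strength"
        · subst h2
          have hnone : rest.lookup "provider_confirmation_strength" = none := pv_lookup_none _ _ hk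
          rw [ihv, hnone]
          have hne : ("normalized_outcome_class" == "provider_confirmation_strength") = false := by decide
          have hne2 : ("provider_confirmation_strength" == "normalized_outcome_class") = false := by decide
          simp only [Option.elim_none, Bool.and_true]
          simp [pvEntryOk, Bool.and_comm]
        · have hb1 : ("normalized_outcome_class" == k) = false := by
            simp; exact fun h => h1 h.symm
          have hb2 : ("provider_confirmation_strength" == k) = false := by
            simp; exact fun h => h2 h.symm
          have hok : pvEntryOk k v = true := by
            simp only [pvEntryOk, if_neg h1, if_neg h2, ite_self]
          simp [hb1, hb2, hok, ihv]

theorem pvRequiredPresent_eq (m : List (String × Option String)) :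
    pvRequiredPresent ["normalized_outcome_class", "provider_confirmation_strength",
                       "provider_status_code", "provider_receipt_ref", "raw_reason_code"] m =
      (["normalized_outcome_class", "provider_confirmation_strength",
        "provider_status_code", "provider_receipt_ref", "raw_reason_code"] : List String).all
        (fun f => (m.map Prod.fst).contains f) := by
  simp only [pvRequiredPresent, List.all_cons, List.all_nil]
  repeat' split <;> simp_all

-- ===== VERDICT (by name: the statement is the Claim_ definition above) =====
theorem mapping_fields_valid_py_spec : Claim_equal_mapping_fields_valid_py := by
  intro m _ hnd
  unfold Spec_mapping_fields_valid_py
  unfold mapping_fields_valid_py mapping_fields_valid_py_alt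
  rw [pvScan_characterization m pvRequiredList (by decide),
      pv_all_entryOk m hnd]
  by_cases he : m.isEmpty
  · have hm : m = [] := List.isEmpty_iff.mp he
    subst hm; decide
  · simp only [he, Bool.false_eq_true, if_false, pvGetA, pvInOutcomes, pvInStrengths,
      pvIsStrOrNone, pvRequiredPresent_eq, pvRequiredList, List.all_cons, List.all_nil,
      pv_contains_eq_lookup_isSome]
    rcases hL1 : m.lookup "normalized_outcome_class" with _ | v1 <;>
    rcases hL2 : m.lookup "provider_confirmation_strength" with _ | v2 <;>
      (simp [Option.join, Bool.and_assoc];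
       try cases v1) <;> (try cases v2) <;> (try simp)
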